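-- pv_equiv track=rewrite | github.com/jekegren01/cs-scrap | GCApractice.py | alternatingSort
-- ===== SOURCE A (Python) =====
-- from collections import deque
--
-- def alternatingSort(a):
--     a = deque(a)
--     if len(a) < 2:
--         return True
--     if a == []:
--         return False
--     # array to hold result
--     b = []
--     # sorted a without duplicates to check against result array to see if
--     # result is sorted or not
--     match = sorted(set(a))
--     # while a still has numbers to sort into result array
--     while len(a) > 0:
--         # if there is an even number of items left
--         if len(b) % 2 == 0:
--             # remove first element and add to result
--             b.append(a.popleft())
--         # else if there is an odd number of items left
--         else:
--             # remove last element and add it to the result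
--             b.append(a.pop())
--     # if result == the original array sorted then return True else return False
--     if b == match:
--         return True
--     return False
-- ===== SOURCE B (Python) =====
-- from collections import deque
--
-- def alternatingSort(a):
--     d = deque(a)
--     prev = None
--     front = True
--     while d:
--         x = d.popleft() if front else d.pop()
--         if prev is not None and x <= prev:
--             return False
--         prev = x
--         front = not front
--     return True
-- ===== Notes on version B (the rewrite author's own statement) =====
-- stated objective: faster
-- what changed: B drops the sorted(set(a)) reference list entirely: it pops elements alternately from the two ends and verifies on the fly that the picked sequence is strictly increasing, one O(n) pass with no sort and no auxiliary result list.
import Mathlib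
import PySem

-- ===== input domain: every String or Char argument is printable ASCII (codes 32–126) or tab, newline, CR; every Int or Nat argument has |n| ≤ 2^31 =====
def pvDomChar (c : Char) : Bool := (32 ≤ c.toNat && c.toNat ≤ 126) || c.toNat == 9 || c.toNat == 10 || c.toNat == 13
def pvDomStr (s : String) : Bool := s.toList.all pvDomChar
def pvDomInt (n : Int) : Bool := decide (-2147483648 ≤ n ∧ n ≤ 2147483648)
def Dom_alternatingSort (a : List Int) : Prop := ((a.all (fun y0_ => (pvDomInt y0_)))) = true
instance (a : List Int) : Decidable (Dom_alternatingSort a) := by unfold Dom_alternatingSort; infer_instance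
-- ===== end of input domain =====

-- B replaces A's sort-and-compare (b == sorted(set(a))) by a single alternating
-- front/back pass that checks strict increase on the fly: no sort, no auxiliary lists.

-- ===== PORT A =====
-- the while loop: pop from the front when len(b) is even, from the back when odd
def altALoop (a b : List Int) : List Int :=
  if _h : a = [] then b
  else if b.length % 2 == 0 then
    altALoop a.tail (b ++ [a.head!])
  else
    altALoop a.dropLast (b ++ [a.getLast!])
termination_by a.length
decreasing_by
  · have := List.length_pos_iff.mpr _h; simp [List.length_tail]; omega
  · have := List.length_pos_iff.mpr _h; simp [List.length_dropLast]; omega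

def alternatingSort (a : List Int) : Bool :=
  if a.length < 2 then true
  -- Python's 'if a == []: return False' compares a deque with a list: always False, unreachable
  else
    let m := PySem.List.sorted (PySem.Set.ofList a) (fun x => x) false
    let b := altALoop a []
    if b == m then true else false

-- ===== PORT B =====
-- while d: pop alternately front/back, fail as soon as the picked value is not strictly larger
def altBLoop (d : List Int) (prev : Option Int) (front : Bool) : Bool :=
  if _h : d = [] then true
  else
    let x := if front then d.head! else d.getLast!
    if (match prev with | some p => decide (x ≤ p) | none => false) then false
    else
      altBLoop (if front then d.tail else d.dropLast) (some x) (!front)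
termination_by d.length
decreasing_by
  have := List.length_pos_iff.mpr _h
  by_cases hf : front <;> simp [hf, List.length_tail, List.length_dropLast] <;> omega

def alternatingSort_alt (a : List Int) : Bool := altBLoop a none true

-- ===== PRECONDITION & SPEC =====
def Spec_alternatingSort (a : List Int) (out : Bool) : Prop := out = alternatingSort_alt a
instance (a : List Int) (out : Bool) : Decidable (Spec_alternatingSort a out) := by unfold Spec_alternatingSort; infer_instance

-- ===== CLAIM (what is proved, stated in full; the proofs are below) =====
def Claim_equal_alternatingSort : Prop := ∀ (a : List Int), Dom_alternatingSort a → Spec_alternatingSort a (alternatingSort a)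

-- ===== LEMMAS AND PROOFS =====

-- the alternating front/back extraction sequence, abstractly
def extAlt (d : List Int) (front : Bool) : List Int :=
  if _h : d = [] then []
  else if front then d.head! :: extAlt d.tail false
  else d.getLast! :: extAlt d.dropLast true
termination_by d.length
decreasing_by
  · have := List.length_pos_iff.mpr _h; simp [List.length_tail]; omega
  · have := List.length_pos_iff.mpr _h; simp [List.length_dropLast]; omega

theorem extAlt_nil (front : Bool) : extAlt [] front = [] := by rw [extAlt]; simp

theorem extAlt_ne {d : List Int} (h : d ≠ []) (front : Bool) :
    extAlt d front = (if front then d.head! else d.getLast!) ::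
      extAlt (if front then d.tail else d.dropLast) (!front) := by
  cases front <;> rw [extAlt] <;> simp [h]

theorem getLast!_eq_getLast {d : List Int} (h : d ≠ []) : d.getLast! = d.getLast h := by
  rw [List.getLast!_eq_getLast?_getD, List.getLast?_eq_some_getLast h]; rfl

theorem altALoop_eq_aux (n : Nat) : ∀ (a : List Int), a.length ≤ n →
    ∀ b, altALoop a b = b ++ extAlt a (b.length % 2 == 0) := by
  induction n with
  | zero =>
    intro a ha b
    have h : a = [] := by cases a <;> simp_all
    subst h; rw [altALoop]; simp [extAlt_nil]
  | succ n ih =>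
    intro a ha b
    by_cases h : a = []
    · subst h; rw [altALoop]; simp [extAlt_nil]
    · have hpos := List.length_pos_iff.mpr h
      rw [altALoop]; simp only [h, dite_false]
      rw [extAlt_ne h]
      by_cases hb : b.length % 2 = 0
      · have hb' : (b.length % 2 == 0) = true := by simp [hb]
        rw [if_pos hb', ih a.tail (by simp [List.length_tail]; omega) (b ++ [a.head!])]
        have : ((b ++ [a.head!]).length % 2 == 0) = false := by simp; omega
        rw [this]
        simp [hb', List.append_assoc]
      · have hb' : (b.length % 2 == 0) = false := by simp [hb]
        rw [if_neg (by simp [hb']), ih a.dropLast (by simp [List.length_dropLast]; omega)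
          (b ++ [a.getLast!])]
        have : ((b ++ [a.getLast!]).length % 2 == 0) = true := by simp; omega
        rw [this]
        simp [hb', List.append_assoc]

theorem altALoop_eq (a : List Int) : altALoop a [] = extAlt a true := by
  have := altALoop_eq_aux a.length a le_rfl []
  simpa using this

theorem altBLoop_eq_aux (n : Nat) : ∀ (d : List Int), d.length ≤ n →
    ∀ (prev : Option Int) (front : Bool),
    altBLoop d prev front =
      decide (List.IsChain (· < ·) (prev.toList ++ extAlt d front)) := by
  induction n with
  | zero =>
    intro d hd prev front
    have h : d = [] := by cases d <;> simp_all
    subst h; rw [altBLoop]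
    cases prev <;> simp [extAlt_nil]
  | succ n ih =>
    intro d hd prev front
    by_cases h : d = []
    · subst h; rw [altBLoop]
      cases prev <;> simp [extAlt_nil]
    · have hpos := List.length_pos_iff.mpr h
      rw [altBLoop]; simp only [h, dite_false]
      rw [extAlt_ne h]
      set x : Int := if front then d.head! else d.getLast! with hx
      set d' : List Int := if front then d.tail else d.dropLast with hd'
      have hlen : d'.length ≤ n := by
        rw [hd']
        by_cases hf : front <;> simp [hf, List.length_tail, List.length_dropLast] <;> omega
      cases prev with
      | none =>
        rw [if_neg (by simp), ih _ hlen]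
        simp
      | some p =>
        by_cases hle : x ≤ p
        · rw [if_pos (by simp [hle])]
          have hnot : ¬ p < x := by omega
          simp [List.isChain_cons_cons, hnot]
        · rw [if_neg (by simp [hle]), ih _ hlen]
          have hpx : p < x := by omega
          simp [List.isChain_cons_cons, hpx]

theorem altBLoop_eq (a : List Int) :
    altBLoop a none true = decide (List.IsChain (· < ·) (extAlt a true)) := by
  have := altBLoop_eq_aux a.length a le_rfl none true
  simpa using this

theorem extAlt_perm_aux (n : Nat) : ∀ (d : List Int), d.length ≤ n →
    ∀ front, (extAlt d front).Perm d := by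
  induction n with
  | zero =>
    intro d hd front
    have h : d = [] := by cases d <;> simp_all
    subst h; simp [extAlt_nil]
  | succ n ih =>
    intro d hd front
    cases d with
    | nil => simp [extAlt_nil]
    | cons y ys =>
      have h : (y :: ys) ≠ [] := by simp
      have hd' : ys.length ≤ n := by simp at hd; omega
      rw [extAlt_ne h]
      by_cases hf : front
      · subst hf
        simp only [if_pos, List.tail_cons]
        have hh : (y :: ys).head! = y := by simp
        rw [hh]
        exact (ih ys hd' false).cons y
      · have hf' : front = false := by simpa using hf
        subst hf'
        rw [if_neg (by simp), if_neg (by simp)]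
        simp only [Bool.not_false]
        have hlen : (y :: ys).dropLast.length ≤ n := by
          simp [List.length_dropLast]; omega
        have h1 := (ih (y :: ys).dropLast hlen true).cons ((y :: ys).getLast!)
        have h2 : ((y :: ys).getLast! :: (y :: ys).dropLast).Perm
            ((y :: ys).dropLast ++ [(y :: ys).getLast!]) :=
          (List.perm_append_singleton _ _).symm
        have h3 : (y :: ys).dropLast ++ [(y :: ys).getLast!] = y :: ys := by
          rw [getLast!_eq_getLast h]; exact List.dropLast_concat_getLast h
        exact (h1.trans h2).trans (List.Perm.of_eq h3)

theorem extAlt_perm (d : List Int) (front : Bool) : (extAlt d front).Perm d :=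
  extAlt_perm_aux d.length d le_rfl front

theorem match_iff_chain (a l : List Int) (hp : l.Perm a) :
    l = PySem.List.sorted (PySem.Set.ofList a) (fun x => x) false ↔
      List.IsChain (· < ·) l := by
  constructor
  · intro h; subst h
    exact List.isChain_iff_pairwise.mpr (PySem.List.sorted_ofList_pairwise_lt a)
  · intro h
    have pw : l.Pairwise (· < ·) := List.isChain_iff_pairwise.mp h
    have hnd : l.Nodup := pw.imp ne_of_lt
    have hnda : a.Nodup := hp.nodup hnd
    have hofl : PySem.Set.ofList a = a := PySem.Set.ofList_eq_self_of_nodup a hnda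
    have hperm : l.Perm (PySem.Set.ofList a) := by rw [hofl]; exact hp
    exact (PySem.List.sorted_eq_of_perm_of_pairwise_lt (PySem.Set.ofList a) l (fun x => x) hperm pw).symm

-- ===== VERDICT (by name: the statement is the Claim_ definition above) =====
theorem alternatingSort_spec : Claim_equal_alternatingSort := by
  intro a _
  unfold Spec_alternatingSort
  have hB : alternatingSort_alt a = decide (List.IsChain (· < ·) (extAlt a true)) :=
    altBLoop_eq a
  unfold alternatingSort
  by_cases hlt : a.length < 2
  · rw [if_pos hlt, hB]
    rcases a with _ | ⟨x, _ | ⟨y, t⟩⟩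
    · simp [extAlt_nil]
    · rw [extAlt_ne (by simp) true]
      simp [extAlt_nil]
    · simp at hlt
  · rw [if_neg hlt, hB]
    simp only [altALoop_eq]
    by_cases hEq : extAlt a true = PySem.List.sorted (PySem.Set.ofList a) (fun x => x) false
    · rw [if_pos (by simp [hEq])]
      have hc := (match_iff_chain a (extAlt a true) (extAlt_perm a true)).mp hEq
      simp [hc]
    · rw [if_neg (by simp [hEq])]
      have hc := (match_iff_chain a (extAlt a true) (extAlt_perm a true)).not.mp hEq
      simp [hc]
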